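-- pv_equiv track=rewrite | github.com/vaibhav-jain-dev/learning-algo | problems/200-must-solve/graphs/10-airport-connections/python_code.py | calculate_unreachable_connections
-- ===== SOURCE A (Python) =====
-- from typing import List, Dict, Set
--
-- def get_reachable_airports_in_set(
--     graph: Dict[str, List[str]],
--     start: str,
--     valid_set: Set[str]
-- ) -> Set[str]:
--     """Get all airports reachable from start that are in valid_set."""
--     reachable: Set[str] = set()
--     stack = [start]
--
--     while stack:
--         airport = stack.pop()
--         if airport in reachable or airport not in valid_set:
--             continue
--         reachable.add(airport)
--         for neighbor in graph[airport]:
--             if neighbor not in reachable and neighbor in valid_set: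
--                 stack.append(neighbor)
--
--     return reachable
--
-- def calculate_unreachable_connections(
--     graph: Dict[str, List[str]],
--     unreachable: Set[str]
-- ) -> Dict[str, int]:
--     """
--     Calculate for each unreachable airport how many other unreachable
--     airports it can reach.
--     """
--     scores: Dict[str, int] = {}
--
--     for airport in unreachable:
--         reachable = get_reachable_airports_in_set(graph, airport, unreachable)
--         scores[airport] = len(reachable)
--
--     return scores
-- ===== SOURCE B (Python) =====
-- def calculate_unreachable_connections(graph, unreachable):
--     """Level-synchronous frontier expansion (set algebra) instead of an explicit stack DFS."""
--     scores = {}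
--     for airport in unreachable:
--         reachable = set()
--         frontier = {airport}
--         while frontier:
--             reachable |= frontier
--             frontier = {n for f in frontier for n in graph[f] if n in unreachable} - reachable
--         scores[airport] = len(reachable)
--     return scores
-- ===== Notes on version B (the rewrite author's own statement) =====
-- stated objective: alternative
-- what changed: The inner reachability search is rewritten as level-synchronous frontier expansion with set algebra (reachable |= frontier; frontier = valid neighbours of frontier minus reachable) instead of A's explicit-stack DFS with per-node pushes and pops; the resulting set and hence each count is identical.
import Mathlib
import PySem

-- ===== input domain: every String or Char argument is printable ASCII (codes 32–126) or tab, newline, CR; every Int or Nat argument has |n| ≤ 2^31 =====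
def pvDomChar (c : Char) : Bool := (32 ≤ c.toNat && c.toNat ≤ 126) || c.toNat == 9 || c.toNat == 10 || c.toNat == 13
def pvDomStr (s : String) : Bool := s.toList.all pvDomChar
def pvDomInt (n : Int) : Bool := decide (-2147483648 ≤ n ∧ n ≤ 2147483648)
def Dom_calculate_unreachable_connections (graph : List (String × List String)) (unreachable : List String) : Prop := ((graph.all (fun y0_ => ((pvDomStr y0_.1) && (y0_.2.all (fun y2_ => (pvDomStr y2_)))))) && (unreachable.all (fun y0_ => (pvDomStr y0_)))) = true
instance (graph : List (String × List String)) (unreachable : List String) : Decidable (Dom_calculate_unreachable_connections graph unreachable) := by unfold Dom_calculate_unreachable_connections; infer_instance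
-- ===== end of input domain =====

-- B replaces the inner explicit-stack DFS by level-synchronous frontier expansion with set
-- algebra (same reachable set, hence same counts); objective: alternative (same cost).

-- shared trivial helper: graph[a] as the Python dict lookup (total form; Pre_ guarantees presence)
def pvNbrs (graph : List (String × List String)) (a : String) : List String :=
  PySem.Dict.getD (PySem.Dict.ofList graph) a []

-- used by goA's termination and goB's fuel argument (stated before the ports so they can cite it)
theorem pvLenFilterLt {l reach reach' : List String} (hsub : ∀ x, x ∈ reach → x ∈ reach')
    {a : String} (hal : a ∈ l) (ha' : a ∈ reach') (har : a ∉ reach) :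
    (l.filter (fun x => decide (x ∉ reach'))).length < (l.filter (fun x => decide (x ∉ reach))).length := by
  induction l with
  | nil => simp at hal
  | cons y ys ih =>
    have hmono : (ys.filter (fun x => decide (x ∉ reach'))).length
        ≤ (ys.filter (fun x => decide (x ∉ reach))).length := by
      refine List.Sublist.length_le (List.monotone_filter_right ys ?_)
      intro x hx; simp only [decide_eq_true_eq] at *; exact fun h => hx (hsub x h)
    rcases List.mem_cons.1 hal with rfl | hmem
    · rw [List.filter_cons, List.filter_cons, if_neg (by simp [ha']), if_pos (by simp [har])]
      simp only [List.length_cons]; omega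
    · by_cases hy' : y ∈ reach'
      · rw [List.filter_cons, List.filter_cons, if_neg (by simp [hy'])]
        by_cases hyr : y ∈ reach
        · rw [if_neg (by simp [hyr])]; exact ih hmem
        · rw [if_pos (by simp [hyr])]; simp only [List.length_cons]
          exact Nat.lt_succ_of_lt (ih hmem)
      · have hyr : y ∉ reach := fun h => hy' (hsub y h)
        rw [List.filter_cons, List.filter_cons, if_pos (by simp [hy']), if_pos (by simp [hyr])]
        simp only [List.length_cons]
        exact Nat.succ_lt_succ (ih hmem)

-- ===== PORT A =====
-- A's get_reachable_airports_in_set: explicit stack, pop from the end; the stack is kept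
-- top-first here, so Python's append-then-pop-last order is the reversed neighbour block.
def goA (graph : List (String × List String)) (valid : List String)
    (reach stack : List String) : List String :=
  match stack with
  | [] => reach
  | a :: rest =>
    if h : a ∈ reach ∨ a ∉ valid then goA graph valid reach rest
    else
      let reach' := PySem.Set.add reach a
      goA graph valid reach'
        (((pvNbrs graph a).filter (fun n => decide (n ∉ reach' ∧ n ∈ valid))).reverse ++ rest)
termination_by ((valid.dedup.filter (fun x => decide (x ∉ reach))).length, stack.length)
decreasing_by
  · apply Prod.Lex.right; simp
  · apply Prod.Lex.left
    have ha : a ∈ valid ∧ a ∉ reach := by tauto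
    have hr' : reach' = reach ++ [a] := by
      simp [reach', PySem.Set.add, ha.2]
    refine pvLenFilterLt (reach' := reach') ?_ (List.mem_dedup.2 ha.1) ?_ ha.2
    · intro x hx; simp [hr', hx]
    · simp [hr']

def calculate_unreachable_connections (graph : List (String × List String))
    (unreachable : List String) : List (String × Int) :=
  (unreachable.foldl
    (fun (scores : PySem.Dict String Int) airport =>
      scores.insert airport ((goA graph unreachable [] [airport]).length : Int))
    PySem.Dict.empty).items

-- ===== PORT B =====
-- B's inner loop: reachable |= frontier; frontier = {valid neighbours of frontier} - reachable.
-- fuel (|valid|+1, a strict bound on the number of iterations) only makes the recursion total.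
def goB (graph : List (String × List String)) (valid : List String) :
    Nat → List String → List String → List String
  | 0, reach, _ => reach
  | fuel + 1, reach, front =>
    if front = [] then reach
    else
      let reach' := PySem.Set.update reach front
      let front' := PySem.Set.diff
        (PySem.Set.ofList ((front.flatMap (fun f => pvNbrs graph f)).filter
          (fun n => decide (n ∈ valid)))) reach'
      goB graph valid fuel reach' front'

def calculate_unreachable_connections_alt (graph : List (String × List String))
    (unreachable : List String) : List (String × Int) :=
  (unreachable.foldl
    (fun (scores : PySem.Dict String Int) airport =>
      scores.insert airport
        ((goB graph unreachable (unreachable.length + 1) [] [airport]).length : Int))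
    PySem.Dict.empty).items

-- ===== PRECONDITION & SPEC =====
-- Pre_ excludes exactly the inputs on which Python A raises KeyError: every airport of
-- `unreachable` is popped with itself in the valid set, so graph[airport] is looked up for
-- each of them (and every further expanded node is again in `unreachable`).
def Pre_calculate_unreachable_connections (graph : List (String × List String)) (unreachable : List String) : Prop :=
  ∀ a ∈ unreachable, (PySem.Dict.ofList graph).contains a = true
instance (graph : List (String × List String)) (unreachable : List String) : Decidable (Pre_calculate_unreachable_connections graph unreachable) := by unfold Pre_calculate_unreachable_connections; infer_instance
def pvWitness_calculate_unreachable_connections : (List (String × List String)) × List String :=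
  ([("a", ["b", "c"]), ("b", ["a"]), ("c", [])], ["a", "b"])
def Spec_calculate_unreachable_connections (graph : List (String × List String)) (unreachable : List String) (out : List (String × Int)) : Prop := out = calculate_unreachable_connections_alt graph unreachable
instance (graph : List (String × List String)) (unreachable : List String) (out : List (String × Int)) : Decidable (Spec_calculate_unreachable_connections graph unreachable out) := by unfold Spec_calculate_unreachable_connections; infer_instance

-- ===== CLAIM (what is proved, stated in full; the proofs are below) =====
def Claim_equal_calculate_unreachable_connections : Prop := ∀ (graph : List (String × List String)) (unreachable : List String), Dom_calculate_unreachable_connections graph unreachable → Pre_calculate_unreachable_connections graph unreachable → Spec_calculate_unreachable_connections graph unreachable (calculate_unreachable_connections graph unreachable)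

-- ===== LEMMAS AND PROOFS =====

-- reachability inside `valid` along graph edges: the set both searches compute
inductive PReach (graph : List (String × List String)) (valid : List String) : String → String → Prop
  | refl (a : String) (h : a ∈ valid) : PReach graph valid a a
  | step {a b c : String} (hab : PReach graph valid a b) (hc : c ∈ pvNbrs graph b)
      (hv : c ∈ valid) : PReach graph valid a c

theorem preach_src_valid {graph : List (String × List String)} {valid : List String}
    {s x : String} (h : PReach graph valid s x) : s ∈ valid := by
  induction h with
  | refl ha => exact ha
  | step _ _ _ ih => exact ih

theorem preach_trans {graph : List (String × List String)} {valid : List String}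
    {a b c : String} (h1 : PReach graph valid a b) (h2 : PReach graph valid b c) :
    PReach graph valid a c := by
  induction h2 with
  | refl _ => exact h1
  | step _ hc hv ih => exact PReach.step ih hc hv

-- "reach is closed under valid neighbours, up to the pending list front"
def PClosed (graph : List (String × List String)) (valid reach front : List String) : Prop :=
  ∀ a ∈ reach, ∀ b ∈ pvNbrs graph a, b ∈ valid → b ∈ reach ∨ b ∈ front

theorem preach_escape {graph : List (String × List String)} {valid reach front : List String}
    (hcl : PClosed graph valid reach front) {s x : String} (hs : s ∈ reach)
    (h : PReach graph valid s x) : x ∈ reach ∨ ∃ t ∈ front, PReach graph valid t x := by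
  induction h with
  | refl _ => exact Or.inl hs
  | step hab hc hv ih =>
    rcases ih with hb | ⟨t, ht, htb⟩
    · rcases hcl _ hb _ hc hv with h1 | h2
      · exact Or.inl h1
      · exact Or.inr ⟨_, h2, PReach.refl _ hv⟩
    · exact Or.inr ⟨t, ht, PReach.step htb hc hv⟩

theorem goA_spec (graph : List (String × List String)) (valid : List String) :
    ∀ reach stack, reach.Nodup → PClosed graph valid reach stack →
      (goA graph valid reach stack).Nodup ∧
      (∀ x, x ∈ goA graph valid reach stack ↔
        x ∈ reach ∨ ∃ s ∈ stack, PReach graph valid s x) := by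
  intro reach stack
  induction reach, stack using goA.induct graph valid with
  | case1 reach =>
    intro hnd _
    refine ⟨by simpa [goA] using hnd, ?_⟩
    intro x; simp [goA]
  | case2 reach a rest h ih =>
    intro hnd hcl
    have hcl' : PClosed graph valid reach rest := by
      intro a' ha' b hb hbv
      rcases hcl a' ha' b hb hbv with h1 | h2
      · exact Or.inl h1
      · rcases List.mem_cons.1 h2 with rfl | h3
        · rcases h with h | h
          · exact Or.inl h
          · exact absurd hbv h
        · exact Or.inr h3
    obtain ⟨hnd', hmem⟩ := ih hnd hcl'
    rw [show goA graph valid reach (a :: rest) = goA graph valid reach rest by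
      rw [goA, dif_pos h]]
    refine ⟨hnd', fun x => ?_⟩
    rw [hmem x]
    constructor
    · rintro (hx | ⟨s, hs, hsx⟩)
      · exact Or.inl hx
      · exact Or.inr ⟨s, List.mem_cons_of_mem _ hs, hsx⟩
    · rintro (hx | ⟨s, hs, hsx⟩)
      · exact Or.inl hx
      · rcases List.mem_cons.1 hs with rfl | hs'
        · rcases h with hin | hout
          · exact preach_escape hcl' hin hsx
          · exact absurd (preach_src_valid hsx) hout
        · exact Or.inr ⟨s, hs', hsx⟩
  | case3 reach a rest h reach' ih =>
    intro hnd hcl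
    have ha : a ∉ reach ∧ a ∈ valid := by tauto
    have hr' : reach' = reach ++ [a] := by
      simp [reach', PySem.Set.add, ha.1]
    set new := ((pvNbrs graph a).filter (fun n => decide (n ∉ reach' ∧ n ∈ valid))).reverse with hnew
    have hmemr' : ∀ x, x ∈ reach' ↔ x ∈ reach ∨ x = a := by
      intro x; simp [hr']
    have hnd2 : reach'.Nodup := by
      rw [hr', ← List.concat_eq_append]; exact hnd.concat ha.1
    have hcl2 : PClosed graph valid reach' (new ++ rest) := by
      intro a' ha' b hb hbv
      rcases (hmemr' a').1 ha' with haR | rfl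
      · rcases hcl a' haR b hb hbv with h1 | h2
        · exact Or.inl ((hmemr' b).2 (Or.inl h1))
        · rcases List.mem_cons.1 h2 with rfl | h3
          · exact Or.inl ((hmemr' b).2 (Or.inr rfl))
          · exact Or.inr (List.mem_append_right _ h3)
      · by_cases hbr : b ∈ reach'
        · exact Or.inl hbr
        · refine Or.inr (List.mem_append_left _ ?_)
          simp [hnew, List.mem_reverse, List.mem_filter, hb, hbr, hbv]
    obtain ⟨hnd', hmem⟩ := ih hnd2 hcl2
    rw [show goA graph valid reach (a :: rest) = goA graph valid reach' (new ++ rest) by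
      rw [goA, dif_neg h]]
    refine ⟨hnd', fun x => ?_⟩
    rw [hmem x]
    have hnewP : ∀ s ∈ new, PReach graph valid a s := by
      intro s hs
      simp only [hnew, List.mem_reverse, List.mem_filter, decide_eq_true_eq] at hs
      exact PReach.step (PReach.refl a ha.2) hs.1 hs.2.2
    constructor
    · rintro (hx | ⟨s, hs, hsx⟩)
      · rcases (hmemr' x).1 hx with hxR | rfl
        · exact Or.inl hxR
        · exact Or.inr ⟨x, List.mem_cons_self, PReach.refl x ha.2⟩
      · rcases List.mem_append.1 hs with hsn | hsr
        · exact Or.inr ⟨a, List.mem_cons_self, preach_trans (hnewP s hsn) hsx⟩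
        · exact Or.inr ⟨s, List.mem_cons_of_mem _ hsr, hsx⟩
    · rintro (hx | ⟨s, hs, hsx⟩)
      · exact Or.inl ((hmemr' x).2 (Or.inl hx))
      · rcases List.mem_cons.1 hs with rfl | hs'
        · exact preach_escape hcl2 ((hmemr' s).2 (Or.inr rfl)) hsx
        · exact Or.inr ⟨s, List.mem_append_right _ hs', hsx⟩

theorem goB_spec (graph : List (String × List String)) (valid : List String) :
    ∀ (fuel : Nat) (reach front : List String), reach.Nodup →
      (∀ f ∈ front, f ∈ valid) → (∀ f ∈ front, f ∉ reach) →
      PClosed graph valid reach front →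
      (valid.dedup.filter (fun x => decide (x ∉ reach))).length < fuel →
      (goB graph valid fuel reach front).Nodup ∧
      (∀ x, x ∈ goB graph valid fuel reach front ↔
        x ∈ reach ∨ ∃ f ∈ front, PReach graph valid f x) := by
  intro fuel
  induction fuel with
  | zero => intro reach front _ _ _ _ hf; omega
  | succ fuel ih =>
    intro reach front hnd hfv hfr hcl hfuel
    by_cases hfe : front = []
    · subst hfe
      refine ⟨by simpa [goB] using hnd, fun x => ?_⟩
      simp [goB]
    · obtain ⟨f0, hf0⟩ : ∃ f0, f0 ∈ front := by
        cases front with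
        | nil => exact absurd rfl hfe
        | cons y ys => exact ⟨y, List.mem_cons_self⟩
      rw [show goB graph valid (fuel + 1) reach front =
          goB graph valid fuel (PySem.Set.update reach front)
            (PySem.Set.diff
              (PySem.Set.ofList ((front.flatMap (fun f => pvNbrs graph f)).filter
                (fun n => decide (n ∈ valid)))) (PySem.Set.update reach front)) by
        rw [goB]; simp [hfe]]
      set reach' := PySem.Set.update reach front with hreach'
      set L := (front.flatMap (fun f => pvNbrs graph f)).filter (fun n => decide (n ∈ valid))
        with hL
      set front' := PySem.Set.diff (PySem.Set.ofList L) reach' with hfront'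
      have hmemr' : ∀ x, x ∈ reach' ↔ x ∈ reach ∨ x ∈ front := by
        intro x; simp [hreach', PySem.Set.mem_update]
      have hmemf' : ∀ x, x ∈ front' ↔ x ∈ L ∧ x ∉ reach' := by
        intro x; simp [hfront', PySem.Set.mem_diff, PySem.Set.mem_ofList]
      have hmemL : ∀ x, x ∈ L ↔ (∃ f ∈ front, x ∈ pvNbrs graph f) ∧ x ∈ valid := by
        intro x; simp [hL, List.mem_filter]
      have hnd2 : reach'.Nodup := PySem.Set.nodup_update _ _ hnd
      have hfv2 : ∀ f ∈ front', f ∈ valid := by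
        intro f hf; exact ((hmemL f).1 ((hmemf' f).1 hf).1).2
      have hfr2 : ∀ f ∈ front', f ∉ reach' := fun f hf => ((hmemf' f).1 hf).2
      have hcl2 : PClosed graph valid reach' front' := by
        intro a' ha' b hb hbv
        rcases (hmemr' a').1 ha' with haR | haF
        · rcases hcl a' haR b hb hbv with h1 | h2
          · exact Or.inl ((hmemr' b).2 (Or.inl h1))
          · exact Or.inl ((hmemr' b).2 (Or.inr h2))
        · by_cases hbr : b ∈ reach'
          · exact Or.inl hbr
          · exact Or.inr ((hmemf' b).2 ⟨(hmemL b).2 ⟨⟨a', haF, hb⟩, hbv⟩, hbr⟩)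
      have hfuel2 : (valid.dedup.filter (fun x => decide (x ∉ reach'))).length < fuel := by
        have hlt := pvLenFilterLt (reach := reach) (reach' := reach')
          (fun x hx => (hmemr' x).2 (Or.inl hx))
          (List.mem_dedup.2 (hfv f0 hf0)) ((hmemr' f0).2 (Or.inr hf0)) (hfr f0 hf0)
        omega
      obtain ⟨hnd', hmem⟩ := ih reach' front' hnd2 hfv2 hfr2 hcl2 hfuel2
      refine ⟨hnd', fun x => ?_⟩
      rw [hmem x]
      constructor
      · rintro (hx | ⟨f', hf', hfx⟩)
        · rcases (hmemr' x).1 hx with hxR | hxF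
          · exact Or.inl hxR
          · exact Or.inr ⟨x, hxF, PReach.refl x (hfv x hxF)⟩
        · obtain ⟨⟨f, hfF, hnbr⟩, hval⟩ := (hmemL f').1 ((hmemf' f').1 hf').1
          exact Or.inr ⟨f, hfF,
            preach_trans (PReach.step (PReach.refl f (hfv f hfF)) hnbr hval) hfx⟩
      · rintro (hx | ⟨f, hf, hfx⟩)
        · exact Or.inl ((hmemr' x).2 (Or.inl hx))
        · exact preach_escape hcl2 ((hmemr' f).2 (Or.inr hf)) hfx

theorem inner_eq (graph : List (String × List String)) (valid : List String)
    (a : String) (ha : a ∈ valid) :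
    ((goA graph valid [] [a]).length : Int) =
    ((goB graph valid (valid.length + 1) [] [a]).length : Int) := by
  have hclA : PClosed graph valid [] [a] := by intro a' ha'; simp at ha'
  obtain ⟨hndA, hmemA⟩ := goA_spec graph valid [] [a] List.nodup_nil hclA
  have hfuel : (valid.dedup.filter (fun x => decide (x ∉ ([] : List String)))).length
      < valid.length + 1 := by
    have h1 : (valid.dedup.filter (fun x => decide (x ∉ ([] : List String)))).length
        ≤ valid.dedup.length := List.length_filter_le _ _
    have h2 : valid.dedup.length ≤ valid.length :=
      List.Sublist.length_le (List.dedup_sublist valid)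
    omega
  obtain ⟨hndB, hmemB⟩ := goB_spec graph valid (valid.length + 1) [] [a] List.nodup_nil
    (by simpa using ha) (by simp) hclA hfuel
  have hperm : (goA graph valid [] [a]).Perm (goB graph valid (valid.length + 1) [] [a]) := by
    rw [List.perm_ext_iff_of_nodup hndA hndB]
    intro x; rw [hmemA x, hmemB x]
  exact_mod_cast hperm.length_eq

-- ===== VERDICT (by name: the statement is the Claim_ definition above) =====
theorem calculate_unreachable_connections_spec : Claim_equal_calculate_unreachable_connections := by
  intro graph unreachable _ _
  unfold Spec_calculate_unreachable_connections
  unfold calculate_unreachable_connections calculate_unreachable_connections_alt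
  congr 1
  apply PySem.List.foldl_congr_mem
  intro scores airport hmem
  rw [inner_eq graph unreachable airport hmem]
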